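-- pv_equiv track=rewrite | github.com/rubancar/advent_code_2023 | exercises/day3.py | at_least_one_difference
-- ===== SOURCE A (Python) =====
-- def at_least_one_difference(array):
--     initial = None
--     other = None
--     for i in array:
--         if i == 3:
--             return True
--         elif i != 0 and initial is None:
--             initial = i
--         elif i != 0:
--             other = i
--
--     if initial is not None and other is not None:
--         return initial != other
--
--     return False
-- ===== SOURCE B (Python) =====
-- def at_least_one_difference(array):
--     if 3 in array:
--         return True
--     first = next((x for x in array if x != 0), None)
--     if first is None:
--         return False
--     last = next(x for x in reversed(array) if x != 0)
--     return first != last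
-- ===== Notes on version B (the rewrite author's own statement) =====
-- stated objective: simpler
-- what changed: Replaces A's stateful single forward pass tracking two Optional scalars through an elif chain with three declarative short-circuit queries: membership of 3, the first nonzero by a forward scan, and the last nonzero by a backward scan over reversed(array), comparing the two.
import Mathlib
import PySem

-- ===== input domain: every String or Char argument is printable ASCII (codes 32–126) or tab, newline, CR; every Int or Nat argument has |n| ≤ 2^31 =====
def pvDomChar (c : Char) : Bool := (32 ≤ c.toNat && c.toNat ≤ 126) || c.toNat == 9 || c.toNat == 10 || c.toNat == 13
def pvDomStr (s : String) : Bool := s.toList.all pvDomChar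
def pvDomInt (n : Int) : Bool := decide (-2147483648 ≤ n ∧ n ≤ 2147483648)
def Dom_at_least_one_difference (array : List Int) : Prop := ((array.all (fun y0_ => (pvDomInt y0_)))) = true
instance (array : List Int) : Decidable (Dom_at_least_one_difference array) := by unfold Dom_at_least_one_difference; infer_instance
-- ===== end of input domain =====

-- B replaces A's stateful single forward pass (two Optional scalars, elif chain) with three
-- short-circuit queries: membership of 3, first nonzero by a forward scan, last nonzero by a
-- backward scan over the reversed list (objective: simpler).

-- ===== PORT A =====
-- loop over the array carrying the two Optional scalars `initial` and `other`
def pvALoop (arr : List Int) (initial other : Option Int) : Bool :=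
  match arr with
  | [] =>
    match initial, other with
    | some a, some b => decide (a ≠ b)
    | _, _ => false
  | i :: rest =>
    if i = 3 then true
    else if i ≠ 0 ∧ initial = none then pvALoop rest (some i) other
    else if i ≠ 0 then pvALoop rest initial (some i)
    else pvALoop rest initial other

def at_least_one_difference (array : List Int) : Bool :=
  pvALoop array none none

-- ===== PORT B =====
-- `next(gen, None)` over a short-circuit generator is `List.find?`; the second `next`
-- (no default) is only reached when a nonzero exists, so its StopIteration branch is
-- unreachable — ported as the (dead) `none => false` arm.
def at_least_one_difference_alt (array : List Int) : Bool :=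
  if (3 : Int) ∈ array then true
  else
    match array.find? (fun x => x ≠ 0) with
    | none => false
    | some first =>
      match array.reverse.find? (fun x => x ≠ 0) with
      | none => false
      | some last => decide (first ≠ last)

-- ===== PRECONDITION & SPEC =====
def Spec_at_least_one_difference (array : List Int) (out : Bool) : Prop := out = at_least_one_difference_alt array
instance (array : List Int) (out : Bool) : Decidable (Spec_at_least_one_difference array out) := by unfold Spec_at_least_one_difference; infer_instance

-- ===== CLAIM (what is proved, stated in full; the proofs are below) =====
def Claim_equal_at_least_one_difference : Prop := ∀ (array : List Int), Dom_at_least_one_difference array → Spec_at_least_one_difference array (at_least_one_difference array)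

-- ===== LEMMAS AND PROOFS =====

theorem getLast?_cons_or (i : Int) (t : List Int) (o : Option Int) :
    ((i :: t).getLast?).or o = (t.getLast?).or (some i) := by
  cases t with
  | nil => simp
  | cons x xs =>
    rw [List.getLast?_cons_cons]
    cases h : (x :: xs).getLast? with
    | none => simp at h
    | some b => simp

-- with `initial = some a`, A's loop answers `a ≠ (last nonzero of arr, else o)`
theorem pvALoop_some (arr : List Int) (a : Int) (o : Option Int) :
    pvALoop arr (some a) o =
      if (3 : Int) ∈ arr then true
      else
        match ((arr.filter (fun i => i ≠ 0)).getLast?).or o with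
        | some b => decide (a ≠ b)
        | none => false := by
  induction arr generalizing o with
  | nil => cases o <;> simp [pvALoop]
  | cons i rest ih =>
    by_cases h3 : i = 3
    · subst h3; simp [pvALoop, List.mem_cons]
    · by_cases h0 : i = 0
      · subst h0
        simp [pvALoop, ih, List.mem_cons, h3]
      · simp only [pvALoop, if_neg h3]
        rw [if_neg (by simp : ¬(i ≠ 0 ∧ (some a : Option Int) = none)),
            if_pos h0, ih]
        simp only [List.filter_cons, if_pos (by simp [h0] : decide (i ≠ 0) = true),
          getLast?_cons_or]
        simp [List.mem_cons, Ne.symm h3]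

-- starting from the initial state, A's loop answers first-vs-last of the nonzero elements
theorem pvALoop_none (arr : List Int) :
    pvALoop arr none none =
      if (3 : Int) ∈ arr then true
      else
        match arr.filter (fun i => i ≠ 0) with
        | [] => false
        | a :: rest =>
          match rest.getLast? with
          | some b => decide (a ≠ b)
          | none => false := by
  induction arr with
  | nil => simp [pvALoop]
  | cons i rest ih =>
    by_cases h3 : i = 3
    · subst h3; simp [pvALoop, List.mem_cons]
    · by_cases h0 : i = 0
      · subst h0
        simp [pvALoop, ih, List.mem_cons, h3]
      · simp only [pvALoop, if_neg h3]
        rw [if_pos (show i ≠ 0 ∧ True from ⟨h0, trivial⟩), pvALoop_some]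
        simp only [List.filter_cons, if_pos (by simp [h0] : decide (i ≠ 0) = true)]
        simp [List.mem_cons, Ne.symm h3]

-- a forward short-circuit search is the head of the filtered list
theorem find?_eq_head?_filter (p : Int → Bool) (l : List Int) :
    l.find? p = (l.filter p).head? := by
  induction l with
  | nil => rfl
  | cons x t ih =>
    simp only [List.find?, List.filter_cons]
    cases h : p x
    · simpa using ih
    · simp

-- a backward short-circuit search is the last of the filtered list
theorem find?_reverse_eq_getLast?_filter (p : Int → Bool) (l : List Int) :
    l.reverse.find? p = (l.filter p).getLast? := by
  rw [find?_eq_head?_filter, List.filter_reverse, List.head?_reverse]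

-- ===== VERDICT (by name: the statement is the Claim_ definition above) =====
theorem at_least_one_difference_spec : Claim_equal_at_least_one_difference := by
  intro array _
  unfold Spec_at_least_one_difference at_least_one_difference at_least_one_difference_alt
  rw [pvALoop_none, find?_eq_head?_filter, find?_reverse_eq_getLast?_filter]
  by_cases h3 : (3 : Int) ∈ array
  · simp [h3]
  · simp only [if_neg h3]
    cases hf : array.filter (fun i => i ≠ 0) with
    | nil => simp
    | cons a rest =>
      cases rest with
      | nil => simp
      | cons b t =>
        simp only [List.head?_cons, List.getLast?_cons_cons]
        cases h : (b :: t).getLast? with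
        | none => simp at h
        | some c => simp
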